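-- pv_equiv track=rewrite | github.com/clemp/ssie-644-research-project | scripts/utils.py | generate_schemas_from_population
-- ===== SOURCE A (Python) =====
-- def generate_schemas_from_solution(bitstring, original=None, index=0) -> list:
--     """Given a bitstring solution, this recursive function returns all wildcard allele schemas present in that solution.
--
--     Args:
--         solution (str): a bitstring solution, eg "010011011".
--
--     Returns:
--         list: a list of all wildcard allele schemas present in the solution.
--     """
--     if original is None:
--         original = bitstring
--     if index == len(bitstring):
--         if bitstring == original:
--             return []
--         else:
--             return [bitstring]
--     else:
--         combinations = []
--         combinations += generate_schemas_from_solution(bitstring, original, index + 1)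
--         bitstring = bitstring[:index] + '*' + bitstring[index+1:]
--         combinations += generate_schemas_from_solution(bitstring, original, index + 1)
--         return combinations
--
-- def generate_schemas_from_population(population:list) -> list:
--     """Given a population of `nbit` length bitstring solutions, this returns all wildcard allele schemas present in that population.
--
--     Args:
--         population (list): a list of `nbit` length bitstring solutions.
--
--     Returns:
--         list: a list of all wildcard allele schemas present in the population.
--     """
--     if len(set([len(s) for s in population])) != 1:
--         raise Exception("Population contains solutions of different lengths. All solutions must be the same length bitstring.")
--
--     schemata = []
--     for solution in population:
--         schemata_matches = generate_schemas_from_solution(solution)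
--         schemata += schemata_matches
--     return schemata
-- ===== SOURCE B (Python) =====
-- def generate_schemas_from_population(population: list) -> list:
--     """Iterative product-style enumeration of wildcard schemas (no recursion)."""
--     if len(set([len(s) for s in population])) != 1:
--         raise Exception("Population contains solutions of different lengths. All solutions must be the same length bitstring.")
--     schemata = []
--     for solution in population:
--         variants = ['']
--         for ch in solution:
--             variants = [v + c for v in variants for c in (ch, '*')]
--         schemata.extend(v for v in variants if v != solution)
--     return schemata
-- ===== Notes on version B (the rewrite author's own statement) =====
-- stated objective: alternative
-- what changed: Replaced the recursive keep/star branching per solution by an iterative product-style enumeration that grows a list of prefix variants one character at a time and then filters out the original string.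
import Mathlib
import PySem

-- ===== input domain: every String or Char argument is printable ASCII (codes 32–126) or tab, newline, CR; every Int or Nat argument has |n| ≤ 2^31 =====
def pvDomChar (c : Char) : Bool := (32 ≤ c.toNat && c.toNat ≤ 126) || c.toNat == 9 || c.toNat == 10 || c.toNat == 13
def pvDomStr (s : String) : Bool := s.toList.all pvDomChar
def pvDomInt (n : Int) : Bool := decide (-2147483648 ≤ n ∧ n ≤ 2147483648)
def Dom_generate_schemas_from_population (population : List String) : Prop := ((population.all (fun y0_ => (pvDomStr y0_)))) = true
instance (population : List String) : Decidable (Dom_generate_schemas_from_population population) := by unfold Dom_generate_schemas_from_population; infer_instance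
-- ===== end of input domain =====

-- B replaces the per-solution recursion by an iterative product-style enumeration (objective: alternative, same cost).
-- Equivalence is about the RETURN value; neither program mutates its argument.

-- ===== PORT A =====
-- Recursion of generate_schemas_from_solution; fuel = bitstring.length - index (Python always
-- starts at index 0, so fuel = length; the index/fuel pair transcribes the same recursion).
def pvGsfsA (bitstring original : List Char) (index : Nat) : Nat → List (List Char)
  | 0 => if bitstring = original then [] else [bitstring]
  | fuel + 1 =>
      pvGsfsA bitstring original (index + 1) fuel ++
      pvGsfsA (bitstring.take index ++ '*' :: bitstring.drop (index + 1)) original (index + 1) fuel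

-- the length-set exception check is Pre_'s to exclude (Python raises there)
def generate_schemas_from_population (population : List String) : List String :=
  population.foldl
    (fun schemata solution =>
      schemata ++ (pvGsfsA solution.toList solution.toList 0 solution.toList.length).map String.ofList)
    []

-- ===== PORT B =====
def generate_schemas_from_population_alt (population : List String) : List String :=
  population.foldl
    (fun schemata solution =>
      let variants := solution.toList.foldl
        (fun vs ch => vs.flatMap (fun v => [v ++ [ch], v ++ ['*']])) [[]]
      schemata ++ (variants.filter (fun v => v ≠ solution.toList)).map String.ofList)
    []

-- ===== PRECONDITION & SPEC =====
-- Pre_ excludes exactly the inputs on which Python A raises its Exception: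
-- the empty population and populations whose solutions do not all have one common length.
def Pre_generate_schemas_from_population (population : List String) : Prop :=
  population ≠ [] ∧ ∀ t ∈ population, t.length = population.headI.length

instance (population : List String) : Decidable (Pre_generate_schemas_from_population population) := by
  unfold Pre_generate_schemas_from_population; infer_instance

def pvWitness_generate_schemas_from_population : List String := ["01", "10"]

def Spec_generate_schemas_from_population (population : List String) (out : List String) : Prop := out = generate_schemas_from_population_alt population
instance (population : List String) (out : List String) : Decidable (Spec_generate_schemas_from_population population out) := by unfold Spec_generate_schemas_from_population; infer_instance

-- ===== CLAIM (what is proved, stated in full; the proofs are below) =====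
def Claim_equal_generate_schemas_from_population : Prop := ∀ (population : List String), Dom_generate_schemas_from_population population → Pre_generate_schemas_from_population population → Spec_generate_schemas_from_population population (generate_schemas_from_population population)

-- ===== LEMMAS AND PROOFS =====

-- Reference enumeration: all keep/star choice lists, leftmost position slowest, keep before star.
def pvEnum : List Char → List (List Char)
  | [] => [[]]
  | c :: cs => (pvEnum cs).map (c :: ·) ++ (pvEnum cs).map ('*' :: ·)

lemma pvGsfsA_eq_enum (fuel : Nat) :
    ∀ (b o : List Char) (i : Nat), b.length = i + fuel →
      pvGsfsA b o i fuel = ((pvEnum (b.drop i)).map (fun suf => b.take i ++ suf)).filter (fun v => v ≠ o) := by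
  induction fuel with
  | zero =>
      intro b o i h
      have hi : b.length ≤ i := by omega
      simp [pvGsfsA, pvEnum, List.drop_eq_nil_of_le hi, List.take_of_length_le hi, List.filter]
      split_ifs with hbo <;> simp [hbo]
  | succ f ih =>
      intro b o i h
      have hi : i < b.length := by omega
      have hdrop : b.drop i = b[i] :: b.drop (i + 1) := List.drop_eq_getElem_cons hi
      have hlen' : (b.take i ++ '*' :: b.drop (i + 1)).length = (i + 1) + f := by
        simp [List.length_append, List.length_take, List.length_drop]
        omega
      have hb1 : b.length = (i + 1) + f := by omega
      rw [pvGsfsA, ih b o (i + 1) hb1,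
        ih (b.take i ++ '*' :: b.drop (i + 1)) o (i + 1) hlen']
      have htake' : (b.take i ++ '*' :: b.drop (i + 1)).take (i + 1) = b.take i ++ ['*'] := by
        rw [List.take_append]
        simp [List.length_take, Nat.min_eq_left (le_of_lt hi), List.take_take]
      have hdrop' : (b.take i ++ '*' :: b.drop (i + 1)).drop (i + 1) = b.drop (i + 1) := by
        rw [List.drop_append]
        simp [List.length_take, Nat.min_eq_left (le_of_lt hi)]
      have htake1 : b.take (i + 1) = b.take i ++ [b[i]] := by
        rw [List.take_add_one]; simp [List.getElem?_eq_getElem hi]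
      rw [htake', hdrop', htake1, hdrop]
      simp only [pvEnum, List.map_append, List.filter_append, List.map_map, Function.comp_def,
        htake1, List.append_assoc, List.cons_append, List.nil_append, List.singleton_append]

-- B's inner foldl computes the same enumeration.
lemma pvFoldl_variants (cs : List Char) :
    ∀ acc : List (List Char),
      cs.foldl (fun vs ch => vs.flatMap (fun v => [v ++ [ch], v ++ ['*']])) acc
        = acc.flatMap (fun v => (pvEnum cs).map (fun suf => v ++ suf)) := by
  induction cs with
  | nil => intro acc; simp [pvEnum]
  | cons c cs ih =>
      intro acc
      rw [List.foldl_cons, ih]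
      simp only [pvEnum, List.flatMap_assoc, List.map_append, List.map_map, Function.comp_def,
        List.flatMap_cons, List.flatMap_nil, List.append_nil, List.append_assoc,
        List.cons_append, List.nil_append, List.singleton_append]

lemma pvPerSolution (s : String) :
    (pvGsfsA s.toList s.toList 0 s.toList.length).map String.ofList
      = ((s.toList.foldl (fun vs ch => vs.flatMap (fun v => [v ++ [ch], v ++ ['*']])) [[]]).filter
          (fun v => v ≠ s.toList)).map String.ofList := by
  rw [pvGsfsA_eq_enum s.toList.length s.toList s.toList 0 (by simp), pvFoldl_variants]
  simp

-- ===== VERDICT (by name: the statement is the Claim_ definition above) =====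
theorem generate_schemas_from_population_spec : Claim_equal_generate_schemas_from_population := by
  intro population _ _
  unfold Spec_generate_schemas_from_population generate_schemas_from_population
    generate_schemas_from_population_alt
  induction population using List.reverseRecOn with
  | nil => rfl
  | append_singleton xs s ih => simp only [List.foldl_append, List.foldl_cons, List.foldl_nil, ih, pvPerSolution]
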